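-- pv_equiv track=rewrite | github.com/Reynouts/AoC19 | AoC19/day22.py | inverted
-- ===== SOURCE A (Python) =====
-- def inverted(data, size, index):
--     for line in data[::-1]:
--         if "deal with increment" in line:
--             #index = (int(line.split(" ")[-1]) * index) % size
--             # x = (y * z) % p
--             # z = (x / % p) * y
--             # index = (index / % size) * increment
--             # index = pow(size, int(line.split(" ")[-1]), index)
--             # Stuck!!
--             t = int(line.split(" ")[-1])
--             # index = modInverse(t, size) * index
--             # index = modInverse(t, index) / size
--             # index = modInverse(size, t) / index
--             # index = modInverse(size, index) / t
--             # index = modInverse(index, size) * t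
--             # index = modInverse(index, t) / size
--
--             continue
--         elif "cut" in line:
--             index = (index + int(line.split(" ")[-1])) % size
--         elif "new" in line:
--             index = (-1 - index) % size
--     return index
-- ===== SOURCE B (Python) =====
-- def inverted(data, size, index):
--     # Fold all ops into one affine map index -> a*index + b, one final mod.
--     a, b, seen = 1, 0, False
--     for line in reversed(data):
--         if "deal with increment" in line:
--             continue
--         elif "cut" in line:
--             b += int(line.split(" ")[-1])
--             seen = True
--         elif "new" in line:
--             a, b = -a, -1 - b
--             seen = True
--     return (a * index + b) % size if seen else index
-- ===== Notes on version B (the rewrite author's own statement) =====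
-- stated objective: alternative
-- what changed: B composes the reversed cut/new ops into a single affine map (a,b) with a seen-flag and applies one final mod, instead of mutating the index with a separate mod per op.
import Mathlib
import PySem

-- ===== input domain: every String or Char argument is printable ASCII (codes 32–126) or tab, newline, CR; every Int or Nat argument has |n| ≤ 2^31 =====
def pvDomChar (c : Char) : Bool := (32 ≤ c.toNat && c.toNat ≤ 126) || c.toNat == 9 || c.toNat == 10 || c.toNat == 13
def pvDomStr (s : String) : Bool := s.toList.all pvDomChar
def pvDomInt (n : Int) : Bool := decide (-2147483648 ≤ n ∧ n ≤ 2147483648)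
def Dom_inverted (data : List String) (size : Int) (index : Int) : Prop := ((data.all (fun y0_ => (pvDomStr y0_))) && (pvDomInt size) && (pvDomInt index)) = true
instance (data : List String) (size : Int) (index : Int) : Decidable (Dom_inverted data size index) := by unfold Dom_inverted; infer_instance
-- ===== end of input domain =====

-- B composes the reversed cut/new ops into one affine map (a, b) plus a seen-flag and takes a
-- single final mod, instead of A's per-op mutation of the index with a mod at every op.

-- shared helper: line.split(" ")[-1]  (split(" ") is never empty, so [-1] never raises)
def pvLastTok (line : String) : String :=
  (PySem.List.pyGet? ((PySem.Str.split? line " ").getD []) (-1)).getD ""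

-- ===== PORT A =====
def invertedStep (size : Int) (index : Int) (line : String) : Int :=
  if PySem.Str.isIn "deal with increment" line then
    index  -- A parses t here too (can raise; excluded by Pre_), then `continue`s
  else if PySem.Str.isIn "cut" line then
    PySem.Int.mod (index + (PySem.Int.ofStr? (pvLastTok line)).getD 0) size
  else if PySem.Str.isIn "new" line then
    PySem.Int.mod (-1 - index) size
  else index

def inverted (data : List String) (size : Int) (index : Int) : Int :=
  ((PySem.List.slice? data none none (-1)).getD []).foldl (invertedStep size) index

-- ===== PORT B =====
def invertedAltStep (st : Int × Int × Bool) (line : String) : Int × Int × Bool :=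
  if PySem.Str.isIn "deal with increment" line then st
  else if PySem.Str.isIn "cut" line then
    (st.1, st.2.1 + (PySem.Int.ofStr? (pvLastTok line)).getD 0, true)
  else if PySem.Str.isIn "new" line then
    (-st.1, -1 - st.2.1, true)
  else st

def inverted_alt (data : List String) (size : Int) (index : Int) : Int :=
  let st := data.reverse.foldl invertedAltStep (1, 0, false)
  if st.2.2 then PySem.Int.mod (st.1 * index + st.2.1) size else index

-- ===== PRECONDITION & SPEC =====
-- Pre_ excludes exactly the inputs where A raises: a ValueError from int() on a
-- "deal with increment" or "cut" line, or a ZeroDivisionError (size = 0) at a cut/new op.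
def pvLineOk (size : Int) (line : String) : Bool :=
  if PySem.Str.isIn "deal with increment" line then (PySem.Int.ofStr? (pvLastTok line)).isSome
  else if PySem.Str.isIn "cut" line then (PySem.Int.ofStr? (pvLastTok line)).isSome && size != 0
  else if PySem.Str.isIn "new" line then size != 0
  else true

def Pre_inverted (data : List String) (size : Int) (index : Int) : Prop :=
  data.all (pvLineOk size) = true
instance (data : List String) (size : Int) (index : Int) : Decidable (Pre_inverted data size index) := by
  unfold Pre_inverted; infer_instance

def pvWitness_inverted : List String × Int × Int :=
  (["cut 3", "deal into new stack", "deal with increment 7"], 10, 4)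

def Spec_inverted (data : List String) (size : Int) (index : Int) (out : Int) : Prop := out = inverted_alt data size index
instance (data : List String) (size : Int) (index : Int) (out : Int) : Decidable (Spec_inverted data size index out) := by unfold Spec_inverted; infer_instance

-- ===== CLAIM (what is proved, stated in full; the proofs are below) =====
def Claim_equal_inverted : Prop := ∀ (data : List String) (size : Int) (index : Int), Dom_inverted data size index → Pre_inverted data size index → Spec_inverted data size index (inverted data size index)
-- ===== LEMMAS AND PROOFS =====

-- B's accumulated (a, b, seen) applied to the starting index.
def pvApply (st : Int × Int × Bool) (size : Int) (index : Int) : Int :=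
  if st.2.2 then PySem.Int.mod (st.1 * index + st.2.1) size else index

theorem pv_mod_add (x n s : Int) :
    PySem.Int.mod (PySem.Int.mod x s + n) s = PySem.Int.mod (x + n) s := by
  simp [PySem.Int.mod]

theorem pv_mod_sub (x c s : Int) :
    PySem.Int.mod (c - PySem.Int.mod x s) s = PySem.Int.mod (c - x) s := by
  have h : c - PySem.Int.mod x s = c - x + s * (x.fdiv s) := by
    simp [PySem.Int.mod, Int.fmod_def]; ring
  simp [PySem.Int.mod] at h ⊢
  rw [h, Int.add_mul_fmod_self_left]

theorem pvAltStep_seen_false (st : Int × Int × Bool) (line : String)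
    (h : (invertedAltStep st line).2.2 = false) : invertedAltStep st line = st := by
  unfold invertedAltStep at *
  split_ifs at h ⊢ <;> simp_all

theorem pv_step_eq (line : String) (a b : Int) (seen : Bool) (size index : Int)
    (hok : pvLineOk size line = true)
    (hst : seen = false → a = 1 ∧ b = 0) :
    invertedStep size (pvApply (a, b, seen) size index) line
      = pvApply (invertedAltStep (a, b, seen) line) size index := by
  unfold invertedStep invertedAltStep pvLineOk at *
  split_ifs at hok ⊢
  · rfl
  · cases seen with
    | false =>
        obtain ⟨ha, hb⟩ := hst rfl; subst ha; subst hb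
        simp [pvApply]
    | true =>
        simp only [pvApply, if_pos]
        rw [pv_mod_add]; ring_nf
  · cases seen with
    | false =>
        obtain ⟨ha, hb⟩ := hst rfl; subst ha; subst hb
        simp [pvApply]; ring_nf
    | true =>
        simp only [pvApply, if_pos]
        rw [pv_mod_sub]; ring_nf
  · rfl

theorem pv_fold_eq (l : List String) (st : Int × Int × Bool) (size index : Int)
    (hok : ∀ line ∈ l, pvLineOk size line = true)
    (hst : st.2.2 = false → st.1 = 1 ∧ st.2.1 = 0) :
    l.foldl (invertedStep size) (pvApply st size index) = pvApply (l.foldl invertedAltStep st) size index := by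
  induction l generalizing st with
  | nil => rfl
  | cons line rest ih =>
      obtain ⟨a, b, seen⟩ := st
      simp only [List.foldl_cons]
      rw [pv_step_eq line a b seen size index (hok line (by simp)) hst]
      exact ih (invertedAltStep (a, b, seen) line)
        (fun x hx => hok x (by simp [hx]))
        (fun h => by
          have he := pvAltStep_seen_false (a, b, seen) line h
          rw [he]; rw [he] at h; exact hst h)

-- ===== VERDICT (by name: the statement is the Claim_ definition above) =====
theorem inverted_spec : Claim_equal_inverted := by
  intro data size index _ hpre
  unfold Spec_inverted inverted inverted_alt
  rw [PySem.List.slice?_none_none_neg_one]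
  simp only [Option.getD_some]
  have h := pv_fold_eq data.reverse (1, 0, false) size index
    (fun line hl => by
      rw [Pre_inverted, List.all_eq_true] at hpre
      exact hpre line (List.mem_reverse.mp hl))
    (fun _ => ⟨rfl, rfl⟩)
  simpa [pvApply] using h
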